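-- pv_equiv track=rewrite | github.com/pypi-data/pypi-mirror-362 | packages/alignment-tools/alignment_tools-0.1.3.tar.gz/alignment_tools-0.1.3/alignment_tools/digest.py | full_digest
-- ===== SOURCE A (Python) =====
-- from typing import Dict, Iterator, List, Optional
-- from typing import List
--
-- def full_digest(
--     seq: str,
--     min_len: int,
--     max_len: int,
--     pre: List[str],
--     not_post: List[str],
--     post: List[str],
--     miscleavages: int,
--     methionine_cleavage: bool,
-- ):
--     seq_len, starts = len(seq), [0]
--     methionine_cleavage = methionine_cleavage and seq[0] == "M"
--
--     check_pre = len(pre) > 0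
--     check_post = len(post) > 0
--
--     cleavage_sites = [0] if methionine_cleavage else []
--     # HACK: inline if statement instead of using is_enzymatic because it is ~20% faster
--     cleavage_sites.extend(
--         [
--             i
--             for i in range(seq_len)
--             if (
--                 check_pre
--                 and seq[i] in pre
--                 and not seq[min([seq_len - 1, i + 1])] in not_post
--             )
--             or (check_post and seq[min([seq_len - 1, i + 1])] in post)
--         ]
--     )
--     cleavage_sites.append(seq_len)
--     for i in cleavage_sites:
--         for start in starts:
--             pep_len = i - start + 1
--             if min_len <= pep_len <= max_len:
--                 yield (seq[start : i + 1])
--         starts.append(i + 1)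
--         methionine_cleaved = int(starts[0] == 0 and methionine_cleavage)
--         if len(starts) > miscleavages + 1 + methionine_cleaved:
--             starts = starts[1 + methionine_cleaved :]
-- ===== SOURCE B (Python) =====
-- # B: inverts A's traversal. A walks cleavage sites end-first, maintaining a mutable
-- # sliding window of start positions. B instead loops start-candidate-first: for each
-- # start candidate k it computes a closed-form range of reachable end-site indices
-- # (from the miscleavage allowance) and drops each qualifying peptide into a per-end
-- # bucket; the buckets are flattened at the end, restoring A's end-major order.
-- def full_digest(
--     seq,
--     min_len,
--     max_len,
--     pre,
--     not_post,
--     post,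
--     miscleavages,
--     methionine_cleavage,
-- ):
--     n = len(seq)
--     met = methionine_cleavage and seq[0:1] == "M"
--     sites = [0] if met else []
--     for i in range(n):
--         nb = seq[min(n - 1, i + 1)]
--         if (pre and seq[i] in pre and nb not in not_post) or (post and nb in post):
--             sites.append(i)
--     sites.append(n)
--     m = len(sites)
--     thr = 2 if met else 1
--     buckets = [[] for _ in range(m)]
--     for k in range(m):
--         start = 0 if k == 0 else sites[k - 1] + 1
--         hi = miscleavages + thr - 1 if k < thr else k + miscleavages
--         if hi > m - 1:
--             hi = m - 1
--         for j in range(k, hi + 1):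
--             end = sites[j]
--             if min_len <= end - start + 1 <= max_len:
--                 buckets[j].append(seq[start : end + 1])
--     return [p for bucket in buckets for p in bucket]
-- ===== Notes on version B (the rewrite author's own statement) =====
-- stated objective: alternative
-- what changed: Inverts the traversal: instead of A's end-major single pass keeping a mutable sliding list of start positions (append + conditional slice-trim per site), B loops start-candidate-major, computes for each start a closed-form interval of reachable end-site indices from the miscleavage allowance, drops qualifying peptides into per-end buckets, and flattens the buckets to restore A's end-major output order.
-- outside the precondition, e.g. on full_digest('MKAKRC', 1, 10, ['K', 'R'], [], [], -1, False): A returns ['MK', 'AK', 'R', 'C'], B returns []; on full_digest('', 1, 5, ['K'], [], [], 1, True): A raises IndexError, B returns ['']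
import Mathlib
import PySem

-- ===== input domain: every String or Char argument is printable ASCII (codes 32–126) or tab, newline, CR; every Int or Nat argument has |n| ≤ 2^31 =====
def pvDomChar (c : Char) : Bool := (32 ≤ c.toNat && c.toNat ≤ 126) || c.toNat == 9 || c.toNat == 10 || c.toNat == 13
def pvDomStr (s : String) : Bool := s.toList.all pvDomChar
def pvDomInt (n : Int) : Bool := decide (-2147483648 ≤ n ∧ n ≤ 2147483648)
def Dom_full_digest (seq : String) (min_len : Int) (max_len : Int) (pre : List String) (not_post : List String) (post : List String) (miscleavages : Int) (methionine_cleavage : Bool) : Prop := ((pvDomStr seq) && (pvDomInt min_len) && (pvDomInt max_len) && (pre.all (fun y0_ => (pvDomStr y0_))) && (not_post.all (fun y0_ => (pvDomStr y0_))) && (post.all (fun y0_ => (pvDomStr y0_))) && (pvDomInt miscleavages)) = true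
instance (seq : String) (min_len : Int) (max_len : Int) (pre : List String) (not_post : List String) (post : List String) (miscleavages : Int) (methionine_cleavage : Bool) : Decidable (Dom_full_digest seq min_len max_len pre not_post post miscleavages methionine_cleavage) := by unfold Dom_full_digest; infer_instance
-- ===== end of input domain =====

-- B inverts A's traversal: A walks cleavage sites end-major keeping a mutable sliding
-- list of start positions; B loops start-candidate-major with a closed-form interval of
-- reachable end-site indices, filling per-end buckets that are flattened at the end
-- (objective: alternative decomposition, same complexity).

-- ===== PORT A =====
-- the Python lines 'pep_len = i - start + 1; if min_len <= pep_len <= max_len: yield seq[start:i+1]'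
def fdEmit (s : List Char) (min_len max_len i start : Int) (out : List String) : List String :=
  if min_len ≤ i - start + 1 ∧ i - start + 1 ≤ max_len then
    out ++ [String.ofList (PySem.List.slice s (some start) (some (i + 1)))]
  else out

-- shared with port B: the enzymatic-site boolean on the two characters involved (both
-- Pythons contain this same condition verbatim)
def fdSiteHit (preL not_postL postL : List (List Char)) (checkPre checkPost : Bool)
    (c d : Char) : Bool :=
  (checkPre && preL.contains [c] && !(not_postL.contains [d])) ||
    (checkPost && postL.contains [d])

-- A's loop body: yield from starts, append i+1, trim the window
def fdStepA (s : List Char) (min_len max_len miscleavages : Int) (met : Bool)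
    (st : List Int × List String) (i : Int) : List Int × List String :=
  let out := st.1.foldl (fun o start => fdEmit s min_len max_len i start o) st.2
  let starts := st.1 ++ [i + 1]
  let mc : Int := if (PySem.List.pyGet? starts 0 == some (0 : Int)) && met then 1 else 0
  let starts := if miscleavages + 1 + mc < PySem.List.len starts then
      PySem.List.slice starts (some (1 + mc)) none
    else starts
  (starts, out)

def full_digest (seq : String) (min_len : Int) (max_len : Int) (pre : List String) (not_post : List String) (post : List String) (miscleavages : Int) (methionine_cleavage : Bool) : List String :=
  let s := seq.toList
  let seq_len : Int := PySem.List.len s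
  let met : Bool := methionine_cleavage && (PySem.List.pyGet? s 0 == some 'M')
  let check_pre : Bool := decide (0 < pre.length)
  let check_post : Bool := decide (0 < post.length)
  let preL := pre.map String.toList
  let not_postL := not_post.map String.toList
  let postL := post.map String.toList
  let sites0 : List Int := if met then [0] else []
  let sites := sites0 ++
      (PySem.List.pyRange 0 seq_len 1).filter (fun i =>
        fdSiteHit preL not_postL postL check_pre check_post
          (PySem.List.pyGetD s i ' ')
          (PySem.List.pyGetD s (min (seq_len - 1) (i + 1)) ' ')) ++
      [seq_len]
  (sites.foldl (fdStepA s min_len max_len miscleavages met) ([0], [])).2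

-- ===== PORT B =====
-- B's loop body for one start-candidate index k: the closed-form end-index interval
-- [k, hi] and the bucket updates 'buckets[j] = buckets[j] + [seq[start:end+1]]'
def fdStepBk (s : List Char) (mn mx misc thr : Int) (sites : List Int) (m : Int)
    (buckets : List (List String)) (k : Int) : List (List String) :=
  let start : Int := if k == 0 then 0 else PySem.List.pyGetD sites (k - 1) 0 + 1
  let hi0 : Int := if k < thr then misc + thr - 1 else k + misc
  let hi : Int := if m - 1 < hi0 then m - 1 else hi0
  (PySem.List.pyRange k (hi + 1) 1).foldl (fun b j =>
      let e := PySem.List.pyGetD sites j 0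
      if mn ≤ e - start + 1 ∧ e - start + 1 ≤ mx then
        PySem.List.pySetD b j (PySem.List.pyGetD b j [] ++
          [String.ofList (PySem.List.slice s (some start) (some (e + 1)))])
      else b) buckets

def full_digest_alt (seq : String) (min_len : Int) (max_len : Int) (pre : List String) (not_post : List String) (post : List String) (miscleavages : Int) (methionine_cleavage : Bool) : List String :=
  let s := seq.toList
  let n : Int := PySem.List.len s
  let met : Bool := methionine_cleavage && (PySem.List.slice s none (some 1) == ['M'])
  let preL := pre.map String.toList
  let not_postL := not_post.map String.toList
  let postL := post.map String.toList
  let sites := ((PySem.List.pyRange 0 n 1).foldl (fun acc i =>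
      if fdSiteHit preL not_postL postL (!pre.isEmpty) (!post.isEmpty)
          (PySem.List.pyGetD s i ' ')
          (PySem.List.pyGetD s (min (n - 1) (i + 1)) ' ') then acc ++ [i] else acc)
      (if met then [(0 : Int)] else [])) ++ [n]
  let m : Int := PySem.List.len sites
  let thr : Int := if met then 2 else 1
  let buckets0 : List (List String) := (PySem.List.pyRange 0 m 1).map (fun _ => [])
  ((PySem.List.pyRange 0 m 1).foldl
      (fdStepBk s min_len max_len miscleavages thr sites m) buckets0).flatten

-- ===== PRECONDITION & SPEC =====
-- Pre_ restricts to the task's natural domain: a non-negative miscleavage count (on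
-- negative counts A's slice-trimming leaves an accidental window, even yielding '' peptides),
-- and a non-empty sequence when methionine cleavage is requested (A raises IndexError on seq[0]).
def Pre_full_digest (seq : String) (min_len : Int) (max_len : Int) (pre : List String) (not_post : List String) (post : List String) (miscleavages : Int) (methionine_cleavage : Bool) : Prop :=
  0 ≤ miscleavages ∧ (methionine_cleavage = true → seq.toList ≠ [])
instance (seq : String) (min_len : Int) (max_len : Int) (pre : List String) (not_post : List String) (post : List String) (miscleavages : Int) (methionine_cleavage : Bool) : Decidable (Pre_full_digest seq min_len max_len pre not_post post miscleavages methionine_cleavage) := by unfold Pre_full_digest; infer_instance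

def pvWitness_full_digest : String × Int × Int × List String × List String × List String × Int × Bool :=
  ("MKAKRC", 1, 10, ["K", "R"], [], [], 1, true)

def Spec_full_digest (seq : String) (min_len : Int) (max_len : Int) (pre : List String) (not_post : List String) (post : List String) (miscleavages : Int) (methionine_cleavage : Bool) (out : List String) : Prop := out = full_digest_alt seq min_len max_len pre not_post post miscleavages methionine_cleavage
instance (seq : String) (min_len : Int) (max_len : Int) (pre : List String) (not_post : List String) (post : List String) (miscleavages : Int) (methionine_cleavage : Bool) (out : List String) : Decidable (Spec_full_digest seq min_len max_len pre not_post post miscleavages methionine_cleavage out) := by unfold Spec_full_digest; infer_instance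

-- ===== CLAIM (what is proved, stated in full; the proofs are below) =====
def Claim_equal_full_digest : Prop := ∀ (seq : String) (min_len : Int) (max_len : Int) (pre : List String) (not_post : List String) (post : List String) (miscleavages : Int) (methionine_cleavage : Bool), Dom_full_digest seq min_len max_len pre not_post post miscleavages methionine_cleavage → Pre_full_digest seq min_len max_len pre not_post post miscleavages methionine_cleavage → Spec_full_digest seq min_len max_len pre not_post post miscleavages methionine_cleavage (full_digest seq min_len max_len pre not_post post miscleavages methionine_cleavage)

-- ===== LEMMAS AND PROOFS =====

-- A-side: the end-major window fold of A, extracted from fd_loop below (one step of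
-- the enumerate-fold A is proved equal to)
def fdStepB (s : List Char) (min_len max_len miscleavages thr : Int) (sc : List Int)
    (out : List String) (je : Int × Int) : List String :=
  let lo0 := je.1 - miscleavages
  let lo := if lo0 < thr then (0 : Int) else lo0
  (PySem.List.pyRange lo (je.1 + 1) 1).foldl
    (fun o k => fdEmit s min_len max_len je.2 (PySem.List.pyGetD sc k 0) o) out

-- the window lower bound of A, as a Nat index into the candidate list
def fdLo (met : Bool) (misc : Int) (j : Nat) : Nat :=
  if (j : Int) - misc < (if met then 2 else 1) then 0 else ((j : Int) - misc).toNat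

theorem fdLo_le (met : Bool) (misc : Int) (hm : 0 ≤ misc) (j : Nat) : fdLo met misc j ≤ j := by
  unfold fdLo; split_ifs <;> omega

theorem fdLo_step (met : Bool) (misc : Int) (j : Nat) :
    (if misc + 1 + (if fdLo met misc j = 0 ∧ met = true then (1 : Int) else 0)
        < (j : Int) + 2 - (fdLo met misc j : Int) then
      fdLo met misc j + (1 + (if fdLo met misc j = 0 ∧ met = true then (1 : Int) else 0)).toNat
    else fdLo met misc j) = fdLo met misc (j + 1) := by
  unfold fdLo
  rcases met <;> simp only [Bool.false_eq_true, and_false, and_true, if_false, if_true,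
    Nat.cast_ite, Nat.cast_zero] <;> split_ifs <;> omega

theorem fdStepA_window (s : List Char) (mn mx misc : Int) (met : Bool) (hm : 0 ≤ misc)
    (done tl : List Int) (i : Int) (hd : ∀ x ∈ done, 0 ≤ x) (hi : 0 ≤ i) (out : List String) :
    fdStepA s mn mx misc met
        ((0 :: done.map (· + 1)).drop (fdLo met misc done.length), out) i
      = ((0 :: (done ++ [i]).map (· + 1)).drop (fdLo met misc (done.length + 1)),
         fdStepB s mn mx misc (if met then 2 else 1)
           (0 :: (done ++ i :: tl).map (· + 1)) out ((done.length : Int), i)) := by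
  have hlo := fdLo_le met misc hm done.length
  set j := done.length with hj
  set lo := fdLo met misc j with hldef
  set L : List Int := 0 :: done.map (· + 1) with hL
  clear_value L lo j
  have hLlen : L.length = j + 1 := by simp [hL, hj]
  have happ : L.drop lo ++ [i + 1] = (L ++ [i + 1]).drop lo := by
    rw [List.drop_append_of_le_length (by omega)]
  have htail : ∀ x ∈ (done.map (· + 1) ++ [i + 1]), 1 ≤ x := by
    intro x hx
    rcases List.mem_append.1 hx with h | h
    · obtain ⟨y, hy, rfl⟩ := List.mem_map.1 h
      have := hd y hy; omega
    · simp at h; omega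
  have hM : L ++ [i + 1] = 0 :: (done.map (· + 1) ++ [i + 1]) := by simp [hL]
  have hMlen : (L ++ [i + 1]).length = j + 2 := by simp [hLlen]
  have hlo2 : lo < (L ++ [i + 1]).length := by omega
  have hheadv : ((L ++ [i + 1])[lo]'hlo2 = 0) ↔ lo = 0 := by
    constructor
    · intro h0
      by_contra hne
      obtain ⟨k, rfl⟩ : ∃ k, lo = k + 1 := ⟨lo - 1, by omega⟩
      simp only [hM, List.getElem_cons_succ] at h0
      have hk2 : k < (done.map (· + 1) ++ [i + 1]).length := by simp; omega
      have h0' : (done.map (· + 1) ++ [i + 1])[k]'hk2 = 0 := h0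
      have := htail _ (List.getElem_mem hk2)
      omega
    · intro h0; subst h0; simp [hM]
  have hhead : PySem.List.pyGet? ((L ++ [i + 1]).drop lo) 0 = some ((L ++ [i + 1])[lo]'hlo2) := by
    rw [PySem.List.pyGet?_zero, List.getElem?_drop]
    simp
  have hmc : (if ((PySem.List.pyGet? ((L ++ [i + 1]).drop lo) 0 == some (0 : Int)) && met) = true
        then (1 : Int) else 0) = (if lo = 0 ∧ met = true then (1 : Int) else 0) := by
    rw [hhead]
    by_cases h0 : lo = 0
    · have hv := hheadv.2 h0
      subst h0
      simp [hv]
    · have hv : ¬((L ++ [i + 1])[lo]'hlo2 = 0) := fun h => h0 (hheadv.1 h)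
      simp [hv, h0]
  have hout : ((L.drop lo).foldl (fun o start => fdEmit s mn mx i start o) out)
      = fdStepB s mn mx misc (if met then 2 else 1)
          (0 :: (done ++ i :: tl).map (· + 1)) out ((j : Int), i) := by
    have hsc : (0 :: (done ++ i :: tl).map (· + 1)) = L ++ ((i + 1) :: tl.map (· + 1)) := by
      simp [hL]
    unfold fdStepB
    have hloI : (if (j : Int) - misc < (if met then 2 else 1) then (0 : Int) else (j : Int) - misc)
        = (lo : Int) := by
      rw [hldef]; unfold fdLo; split_ifs <;> omega
    simp only [hloI, hsc]
    have hlen : ((j : Int) + 1) = PySem.List.len L := by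
      rw [PySem.List.len_eq, hLlen]; omega
    rw [hlen]
    have hcong : (PySem.List.pyRange (lo : Int) (PySem.List.len L)).foldl
          (fun o k => fdEmit s mn mx i
            (PySem.List.pyGetD (L ++ (i + 1) :: tl.map (· + 1)) k 0) o) out
        = (PySem.List.pyRange (lo : Int) (PySem.List.len L)).foldl
          (fun o k => fdEmit s mn mx i (PySem.List.pyGetD L k 0) o) out := by
      refine PySem.List.foldl_congr_mem _ _ _ _ ?_
      intro acc k hk
      rw [PySem.List.mem_pyRange_one] at hk
      have h0k : (0 : Int) ≤ k := le_trans (Int.natCast_nonneg lo) hk.1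
      have hkl : k < (L.length : Int) := by
        have := hk.2; rw [PySem.List.len_eq] at this; exact this
      have hgg : PySem.List.pyGetD (L ++ (i + 1) :: tl.map (· + 1)) k 0
          = PySem.List.pyGetD L k 0 := by
        rw [PySem.List.pyGetD_eq_getElem _ _ h0k (by simp; omega),
            PySem.List.pyGetD_eq_getElem _ _ h0k hkl]
        exact List.getElem_append_left _
      rw [hgg]
    rw [hcong, PySem.List.foldl_pyRange_pyGetD L 0
        (fun o start => fdEmit s mn mx i start o) out (Int.natCast_nonneg lo)]
    simp
  simp only [fdStepA, happ]
  refine Prod.ext ?_ hout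
  have hR : (0 :: (done ++ [i]).map (· + 1)) = L ++ [i + 1] := by simp [hL]
  show (if misc + 1 + (if ((PySem.List.pyGet? ((L ++ [i + 1]).drop lo) 0 == some (0 : Int)) && met)
              = true then (1 : Int) else 0)
          < PySem.List.len ((L ++ [i + 1]).drop lo) then
        PySem.List.slice ((L ++ [i + 1]).drop lo)
          (some (1 + (if ((PySem.List.pyGet? ((L ++ [i + 1]).drop lo) 0 == some (0 : Int)) && met)
              = true then (1 : Int) else 0))) none
      else (L ++ [i + 1]).drop lo)
    = (0 :: (done ++ [i]).map (· + 1)).drop (fdLo met misc (j + 1))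
  rw [hmc, hR]
  have hlend : PySem.List.len ((L ++ [i + 1]).drop lo) = ((j : Int) + 2 - (lo : Int)) := by
    rw [PySem.List.len_eq]; rw [List.length_drop, hMlen]; omega
  rw [hlend, ← fdLo_step met misc j, ← hldef]
  split_ifs <;> first
    | rfl
    | rw [PySem.List.slice_from _ (by omega), List.drop_drop]

theorem fd_loop (s : List Char) (mn mx misc : Int) (met : Bool) (hm : 0 ≤ misc) :
    ∀ (rest done : List Int) (out : List String),
    (∀ x ∈ done, 0 ≤ x) → (∀ x ∈ rest, 0 ≤ x) →
    (rest.foldl (fdStepA s mn mx misc met)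
        ((0 :: done.map (· + 1)).drop (fdLo met misc done.length), out)).2
      = (PySem.List.enumerate rest (done.length : Int)).foldl
          (fdStepB s mn mx misc (if met then 2 else 1) (0 :: (done ++ rest).map (· + 1))) out := by
  intro rest
  induction rest with
  | nil =>
    intro done out _ _
    simp [PySem.List.enumerate_nil]
  | cons i tl ih =>
    intro done out hd hr
    rw [List.foldl_cons, fdStepA_window s mn mx misc met hm done tl i hd (hr i (by simp)) out,
        PySem.List.enumerate_cons, List.foldl_cons]
    have h1 := ih (done ++ [i])
      (fdStepB s mn mx misc (if met then 2 else 1) (0 :: (done ++ i :: tl).map (· + 1)) out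
        ((done.length : Int), i))
      (by
        intro x hx
        rcases List.mem_append.1 hx with h | h
        · exact hd x h
        · simp only [List.mem_singleton] at h
          subst h
          exact hr x (by simp))
      (by
        intro x hx
        exact hr x (by simp [hx]))
    have hlen : (done ++ [i]).length = done.length + 1 := by simp
    have hassoc : (done ++ [i]) ++ tl = done ++ i :: tl := by simp
    rw [hlen, hassoc] at h1
    rw [h1]
    congr 1

theorem fd_main (s : List Char) (mn mx misc : Int) (met : Bool) (hm : 0 ≤ misc)
    (S : List Int) (hnn : ∀ x ∈ S, 0 ≤ x) :
    (S.foldl (fdStepA s mn mx misc met) ([0], [])).2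
      = (PySem.List.enumerate S 0).foldl
          (fdStepB s mn mx misc (if met then 2 else 1) (0 :: S.map (· + 1))) [] := by
  have h := fd_loop s mn mx misc met hm S [] [] (by simp) hnn
  have h0 : fdLo met misc 0 = 0 := by unfold fdLo; split_ifs <;> omega
  simpa [h0] using h

-- shared vocabulary of the block decomposition
def fdLoI (thr misc j : Int) : Int := if j - misc < thr then 0 else j - misc

def fdOk (mn mx e st : Int) : Bool := decide (mn ≤ e - st + 1 ∧ e - st + 1 ≤ mx)

def fdPep (s : List Char) (e st : Int) : String :=
  String.ofList (PySem.List.slice s (some st) (some (e + 1)))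

def fdStart (S : List Int) (k : Int) : Int :=
  if k == 0 then (0 : Int) else PySem.List.pyGetD S (k - 1) 0 + 1

-- the peptides emitted at end-site index j, from start-candidate indices in [fdLoI, b)
def fdBlk (s : List Char) (mn mx thr misc : Int) (S : List Int) (j b : Int) : List String :=
  ((PySem.List.pyRange (fdLoI thr misc j) b 1).filter
      (fun k => fdOk mn mx (PySem.List.pyGetD S j 0) (fdStart S k))).map
    (fun k => fdPep s (PySem.List.pyGetD S j 0) (fdStart S k))

theorem fdStart_sc (S : List Int) (k : Int) (h0 : 0 ≤ k) (hk : k ≤ (S.length : Int)) :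
    PySem.List.pyGetD (0 :: S.map (· + 1)) k 0 = fdStart S k := by
  unfold fdStart
  by_cases hz : k = 0
  · subst hz; simp [PySem.List.pyGetD_zero_cons]
  · rw [if_neg (by simpa using hz)]
    have hlen : (0 :: S.map (· + 1)).length = S.length + 1 := by simp
    rw [PySem.List.pyGetD_eq_getElem _ _ h0 (by rw [hlen]; push_cast; omega),
        PySem.List.pyGetD_eq_getElem _ _ (by omega) (by omega)]
    have ht : k.toNat = (k - 1).toNat + 1 := by omega
    have h2 : k.toNat < (0 :: S.map (· + 1)).length := by
      rw [hlen]; omega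
    have := getElem_congr (c := 0 :: S.map (· + 1)) rfl ht h2
    rw [this]
    simp

theorem fdLoI_nonneg (thr misc j : Int) (hthr : 0 ≤ thr) : 0 ≤ fdLoI thr misc j := by
  unfold fdLoI; split_ifs <;> omega

-- one step of A's window fold emits one block
theorem fdStepB_eq (s : List Char) (mn mx misc thr : Int) (sc : List Int)
    (out : List String) (j e : Int) :
    fdStepB s mn mx misc thr sc out (j, e)
      = out ++ ((PySem.List.pyRange (fdLoI thr misc j) (j + 1) 1).filter
            (fun k => fdOk mn mx e (PySem.List.pyGetD sc k 0))).map
          (fun k => fdPep s e (PySem.List.pyGetD sc k 0)) := by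
  unfold fdStepB fdEmit fdLoI fdOk fdPep
  exact PySem.List.foldl_append_ite
    (fun k => mn ≤ e - PySem.List.pyGetD sc k 0 + 1 ∧ e - PySem.List.pyGetD sc k 0 + 1 ≤ mx)
    (fun k => String.ofList (PySem.List.slice s (some (PySem.List.pyGetD sc k 0)) (some (e + 1))))
    _ _

-- A = flatten of the blocks, end-major
theorem fdA_blocks (s : List Char) (mn mx misc thr : Int) (S : List Int)
    (hthr : 1 ≤ thr) :
    (PySem.List.enumerate S 0).foldl (fdStepB s mn mx misc thr (0 :: S.map (· + 1))) []
      = ((PySem.List.pyRange 0 (S.length : Int) 1).map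
          (fun j => fdBlk s mn mx thr misc S j (j + 1))).flatten := by
  set sc := 0 :: S.map (· + 1) with hsc
  have h1 : (PySem.List.enumerate S 0).foldl (fdStepB s mn mx misc thr sc) []
      = (PySem.List.enumerate S 0).foldl (fun out je => out ++
          ((PySem.List.pyRange (fdLoI thr misc je.1) (je.1 + 1) 1).filter
              (fun k => fdOk mn mx je.2 (PySem.List.pyGetD sc k 0))).map
            (fun k => fdPep s je.2 (PySem.List.pyGetD sc k 0))) [] := by
    refine PySem.List.foldl_congr_mem _ _ _ _ ?_
    intro acc je _
    rcases je with ⟨j, e⟩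
    exact fdStepB_eq s mn mx misc thr sc acc j e
  rw [h1, PySem.List.foldl_append_eq_flatMap, List.nil_append,
      PySem.List.enumerate_eq_map_pyRange (d := 0), List.flatMap_def, List.map_map]
  simp only [PySem.List.len_eq]
  congr 1
  apply List.map_congr_left
  intro j hj
  rw [PySem.List.mem_pyRange_one] at hj
  unfold fdBlk
  have hconv : ∀ k ∈ PySem.List.pyRange (fdLoI thr misc j) (j + 1) 1,
      PySem.List.pyGetD sc k 0 = fdStart S k := by
    intro k hk
    rw [PySem.List.mem_pyRange_one] at hk
    have h0 : 0 ≤ k := le_trans (fdLoI_nonneg thr misc j (by omega)) hk.1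
    exact fdStart_sc S k h0 (by omega)
  simp only [Function.comp_apply]
  rw [List.filter_congr (fun k hk => by rw [hconv k hk])]
  apply List.map_congr_left
  intro k hk
  have := hconv k (List.mem_of_mem_filter hk)
  rw [this]


-- setting one bucket of a mapped range
theorem fdSetMap (M : Int) (G H : Int → List String) (j0 : Int) (h0 : 0 ≤ j0)
    (hag : ∀ j, 0 ≤ j → j < M → j ≠ j0 → G j = H j) :
    PySem.List.pySetD ((PySem.List.pyRange 0 M 1).map G) j0 (H j0)
      = (PySem.List.pyRange 0 M 1).map H := by
  rw [PySem.List.pySetD_of_nonneg _ _ h0]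
  apply List.ext_getElem
  · simp
  · intro t ht1 ht2
    rw [List.getElem_set]
    simp only [List.getElem_map, PySem.List.getElem_pyRange_one, zero_add]
    have htM : (t : Int) < M := by
      simp [PySem.List.length_pyRange_one] at ht2; omega
    by_cases he : j0.toNat = t
    · have hc : ((t : Nat) : Int) = j0 := by omega
      rw [if_pos he, hc]
    · rw [if_neg he]
      exact hag _ (by positivity) htM (by omega)

-- the generic bucket-range update of B's inner loop
theorem fdInner (M a b : Int) (F : Int → List String) (P : Int → Prop) [DecidablePred P]
    (g : Int → String) (ha : 0 ≤ a) (hbM : b ≤ M) :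
    (PySem.List.pyRange a b 1).foldl
        (fun bu j => if P j then
            PySem.List.pySetD bu j (PySem.List.pyGetD bu j [] ++ [g j]) else bu)
        ((PySem.List.pyRange 0 M 1).map F)
      = (PySem.List.pyRange 0 M 1).map
          (fun j => if a ≤ j ∧ j < b ∧ P j then F j ++ [g j] else F j) := by
  have key : ∀ (t : Nat) (b : Int), b ≤ M → b ≤ a + t →
      (PySem.List.pyRange a b 1).foldl
        (fun bu j => if P j then
            PySem.List.pySetD bu j (PySem.List.pyGetD bu j [] ++ [g j]) else bu)
        ((PySem.List.pyRange 0 M 1).map F)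
      = (PySem.List.pyRange 0 M 1).map
          (fun j => if a ≤ j ∧ j < b ∧ P j then F j ++ [g j] else F j) := by
    intro t
    induction t with
    | zero =>
      intro b _ hle
      have hba : b ≤ a := by omega
      rw [PySem.List.pyRange_one_eq_nil hba, List.foldl_nil]
      apply List.map_congr_left
      intro j hj
      rw [PySem.List.mem_pyRange_one] at hj
      rw [if_neg (by omega)]
    | succ n ih =>
      intro b hbM hle
      by_cases hsmall : b ≤ a + n
      · exact ih b hbM hsmall
      · have hab : a < b := by omega
        rw [show b = (b - 1) + 1 by ring, PySem.List.pyRange_one_succ_right (by omega),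
            List.foldl_append, ih (b - 1) (by omega) (by omega),
            List.foldl_cons, List.foldl_nil]
        set j0 := b - 1 with hj0
        set G : Int → List String :=
          fun j => if a ≤ j ∧ j < j0 ∧ P j then F j ++ [g j] else F j with hG
        set H : Int → List String :=
          fun j => if a ≤ j ∧ j < j0 + 1 ∧ P j then F j ++ [g j] else F j with hH
        have h00 : 0 ≤ j0 := by omega
        have h0M : j0 < M := by omega
        have hag : ∀ j, 0 ≤ j → j < M → j ≠ j0 → G j = H j := by
          intro j _ _ hne
          rw [hG, hH]
          simp only []
          by_cases hPj : P j
          · by_cases hlt : a ≤ j ∧ j < j0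
            · rw [if_pos ⟨hlt.1, hlt.2, hPj⟩, if_pos ⟨hlt.1, by omega, hPj⟩]
            · rw [if_neg (fun h => hlt ⟨h.1, h.2.1⟩),
                  if_neg (fun h => hlt ⟨h.1, by have := h.2.1; omega⟩)]
          · rw [if_neg (by simp [hPj]), if_neg (by simp [hPj])]
        by_cases hP : P j0
        · rw [if_pos hP]
          have hget : PySem.List.pyGetD ((PySem.List.pyRange 0 M 1).map G) j0 [] = G j0 :=
            PySem.List.pyGetD_map_pyRange_of_nonneg G M j0 [] h00 h0M
          have hGj0 : G j0 = F j0 := by rw [hG]; simp only []; rw [if_neg (by omega)]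
          have hHj0 : H j0 = F j0 ++ [g j0] := by
            rw [hH]; simp only []; rw [if_pos ⟨by omega, by omega, hP⟩]
          rw [hget, hGj0, ← hHj0]
          exact fdSetMap M G H j0 h00 hag
        · rw [if_neg hP]
          apply List.map_congr_left
          intro j hj
          rw [PySem.List.mem_pyRange_one] at hj
          by_cases hne : j = j0
          · subst hne
            rw [hG, hH]; simp only []
            rw [if_neg (by omega), if_neg (by intro h; exact hP h.2.2)]
          · exact hag j (by omega) (by omega) hne
  exact key (b - a).toNat b hbM (by omega)


-- one outer step of B turns the K-bucket state into the (K+1)-bucket state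
-- the start-index window [k,hi] and the end-index window [lo,j] describe the same pairs
theorem fdWin (thr misc K j M : Int) (h0 : 0 ≤ K) (hj : j < M) :
    (K ≤ j ∧ j < (if M - 1 < (if K < thr then misc + thr - 1 else K + misc) then M - 1
        else (if K < thr then misc + thr - 1 else K + misc)) + 1)
      ↔ (fdLoI thr misc j ≤ K ∧ K ≤ j) := by
  unfold fdLoI; split_ifs <;> omega

theorem fdStepBk_buckets (s : List Char) (mn mx misc thr : Int) (S : List Int) (K : Int)
    (h0 : 0 ≤ K) :
    fdStepBk s mn mx misc thr S (S.length : Int)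
        ((PySem.List.pyRange 0 (S.length : Int) 1).map
          (fun j => fdBlk s mn mx thr misc S j (min (j + 1) K))) K
      = (PySem.List.pyRange 0 (S.length : Int) 1).map
          (fun j => fdBlk s mn mx thr misc S j (min (j + 1) (K + 1))) := by
  set M : Int := (S.length : Int) with hM
  unfold fdStepBk
  simp only []
  have hstart : (if K == 0 then (0 : Int) else PySem.List.pyGetD S (K - 1) 0 + 1)
      = fdStart S K := rfl
  rw [hstart]
  set hi : Int := if M - 1 < (if K < thr then misc + thr - 1 else K + misc) then M - 1
      else (if K < thr then misc + thr - 1 else K + misc) with hhi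
  have hbM : hi + 1 ≤ M := by rw [hhi]; split_ifs <;> omega
  rw [fdInner M K (hi + 1)
      (fun j => fdBlk s mn mx thr misc S j (min (j + 1) K))
      (fun j => mn ≤ PySem.List.pyGetD S j 0 - fdStart S K + 1 ∧
        PySem.List.pyGetD S j 0 - fdStart S K + 1 ≤ mx)
      (fun j => String.ofList (PySem.List.slice s (some (fdStart S K))
        (some (PySem.List.pyGetD S j 0 + 1)))) h0 hbM]
  apply List.map_congr_left
  intro j hj
  rw [PySem.List.mem_pyRange_one] at hj
  have hwin := fdWin thr misc K j M h0 hj.2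
  rw [← hhi] at hwin
  by_cases hc : fdLoI thr misc j ≤ K ∧ K ≤ j
  · have hmin1 : min (j + 1) (K + 1) = K + 1 := by omega
    have hmin0 : min (j + 1) K = K := by omega
    rw [hmin1, hmin0]
    unfold fdBlk
    rw [PySem.List.pyRange_one_succ_right hc.1, List.filter_append, List.map_append]
    by_cases hP : mn ≤ PySem.List.pyGetD S j 0 - fdStart S K + 1 ∧
        PySem.List.pyGetD S j 0 - fdStart S K + 1 ≤ mx
    · rw [if_pos ⟨hc.2, by omega, hP⟩]
      have hfilter : List.filter (fun k => fdOk mn mx (PySem.List.pyGetD S j 0) (fdStart S k)) [K]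
          = [K] := by
        simp only [List.filter_cons, List.filter_nil]
        rw [if_pos (by simp [fdOk]; omega)]
      rw [hfilter]
      rfl
    · rw [if_neg (fun h => hP h.2.2)]
      have hfilter : List.filter (fun k => fdOk mn mx (PySem.List.pyGetD S j 0) (fdStart S k)) [K]
          = [] := by
        simp only [List.filter_cons, List.filter_nil]
        rw [if_neg (by simp [fdOk]; omega)]
      rw [hfilter]
      simp
  · rw [if_neg (fun h => hc (hwin.1 ⟨h.1, h.2.1⟩))]
    by_cases hlt : j < K
    · have : min (j + 1) (K + 1) = min (j + 1) K := by omega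
      rw [this]
    · have hcK : ¬ fdLoI thr misc j ≤ K := by
        intro hle
        exact hc ⟨hle, by omega⟩
      unfold fdBlk
      rw [show min (j + 1) K = K by omega, show min (j + 1) (K + 1) = K + 1 by omega,
          PySem.List.pyRange_one_eq_nil (by omega), PySem.List.pyRange_one_eq_nil (by omega)]


-- B's outer fold reaches the M-bucket state
theorem fdB_buckets (s : List Char) (mn mx misc thr : Int) (S : List Int) :
    ∀ (t : Nat) (K : Int), 0 ≤ K → (S.length : Int) - K = (t : Int) →
    (PySem.List.pyRange K (S.length : Int) 1).foldl
        (fdStepBk s mn mx misc thr S (S.length : Int))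
        ((PySem.List.pyRange 0 (S.length : Int) 1).map
          (fun j => fdBlk s mn mx thr misc S j (min (j + 1) K)))
      = (PySem.List.pyRange 0 (S.length : Int) 1).map
          (fun j => fdBlk s mn mx thr misc S j (min (j + 1) (S.length : Int))) := by
  intro t
  induction t with
  | zero =>
    intro K h0 ht
    have hKM : K = (S.length : Int) := by omega
    rw [PySem.List.pyRange_one_eq_nil (show (S.length : Int) ≤ K by omega), List.foldl_nil, hKM]
  | succ n ih =>
    intro K h0 ht
    have hKM : K < (S.length : Int) := by omega
    rw [PySem.List.pyRange_one_cons hKM, List.foldl_cons,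
        fdStepBk_buckets s mn mx misc thr S K (by omega)]
    exact ih (K + 1) (by omega) (by omega)


-- ===== VERDICT (by name: the statement is the Claim_ definition above) =====
theorem full_digest_spec : Claim_equal_full_digest := by
  unfold Claim_equal_full_digest
  intro seq mn mx pre np po misc mcv hdom hpre
  obtain ⟨hm, hne⟩ := hpre
  unfold Spec_full_digest
  simp only [full_digest, full_digest_alt]
  have hbp : (decide (0 < pre.length)) = !pre.isEmpty := by cases pre <;> simp
  have hbo : (decide (0 < po.length)) = !po.isEmpty := by cases po <;> simp
  have hmet : (mcv && (PySem.List.pyGet? seq.toList 0 == some 'M'))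
      = (mcv && (PySem.List.slice seq.toList none (some 1) == ['M'])) := by
    cases hmb : mcv
    · simp
    · have hsne := hne hmb
      rcases hs : seq.toList with _ | ⟨c, t⟩
      · exact absurd hs hsne
      · simp [PySem.List.slice_to (xs := c :: t) (b := 1) (by omega)]
  rw [hmet, hbp, hbo]
  set s := seq.toList with hs
  set met : Bool := mcv && (PySem.List.slice s none (some 1) == ['M']) with hmetdef
  set thr : Int := if met = true then 2 else 1 with hthrdef
  have hthr : 1 ≤ thr := by rw [hthrdef]; split_ifs <;> omega
  set flt : List Int := (PySem.List.pyRange 0 (PySem.List.len s) 1).filter (fun i =>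
      fdSiteHit (pre.map String.toList) (np.map String.toList) (po.map String.toList)
        (!pre.isEmpty) (!po.isEmpty) (PySem.List.pyGetD s i ' ')
        (PySem.List.pyGetD s (min (PySem.List.len s - 1) (i + 1)) ' ')) with hflt
  have hfold : (PySem.List.pyRange 0 (PySem.List.len s) 1).foldl (fun acc i =>
      if fdSiteHit (pre.map String.toList) (np.map String.toList) (po.map String.toList)
          (!pre.isEmpty) (!po.isEmpty) (PySem.List.pyGetD s i ' ')
          (PySem.List.pyGetD s (min (PySem.List.len s - 1) (i + 1)) ' ') then acc ++ [i] else acc)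
      (if met = true then [(0 : Int)] else [])
      = (if met = true then [(0 : Int)] else []) ++ flt :=
    PySem.List.foldl_append_if_eq_filter _ _ _
  rw [hfold]
  set S : List Int := (if met = true then [(0 : Int)] else []) ++ flt ++ [PySem.List.len s]
    with hS
  have hnn : ∀ x ∈ S, 0 ≤ x := by
    intro x hx
    rw [hS] at hx
    rcases List.mem_append.1 hx with h | h
    · rcases List.mem_append.1 h with h | h
      · split_ifs at h <;> simp at h
        omega
      · rw [hflt] at h
        rcases List.mem_filter.1 h with ⟨hmem, _⟩
        exact (PySem.List.mem_pyRange_one.1 hmem).1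
    · simp at h
      subst h
      positivity
  -- A side
  rw [fd_main s mn mx misc met hm S hnn, ← hthrdef, fdA_blocks s mn mx misc thr S hthr]
  -- B side
  rw [PySem.List.len_eq (xs := S)]
  have hb0 : ((PySem.List.pyRange 0 (S.length : Int) 1).map (fun _ => ([] : List String)))
      = (PySem.List.pyRange 0 (S.length : Int) 1).map
          (fun j => fdBlk s mn mx thr misc S j (min (j + 1) 0)) := by
    apply List.map_congr_left
    intro j hj
    rw [PySem.List.mem_pyRange_one] at hj
    unfold fdBlk
    rw [show min (j + 1) (0 : Int) = 0 by omega,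
        PySem.List.pyRange_one_eq_nil (fdLoI_nonneg thr misc j (by omega))]
    simp
  rw [hb0, fdB_buckets s mn mx misc thr S S.length 0 (by omega) (by omega)]
  congr 1
  apply List.map_congr_left
  intro j hj
  rw [PySem.List.mem_pyRange_one] at hj
  rw [show min (j + 1) ((S.length : Int)) = j + 1 by omega]
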